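-- pv_equiv track=rewrite | github.com/wilmurillo-ai/Design-Assistant | .skills/openclaw-skills/skills/widingmarcus-cyber/mindgardener/src/engram/chunker.py | pre_filter
-- ===== SOURCE A (Python) =====
-- def pre_filter(text: str) -> str:
--     """
--     Remove low-signal content before sending to LLM.
--
--     Strips:
--     - Code blocks (```...```) unless they're short
--     - Log output (lines starting with timestamps/brackets)
--     - Repeated patterns (heartbeat checks, status lines)
--     - Pure whitespace sections
--     """
--     lines = text.split('\n')
--     filtered = []
--     in_code_block = False
--     code_block_lines = 0
--     code_block_buffer = []
--     seen_patterns = set()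
--
--     for line in lines:
--         # Track code blocks
--         if line.strip().startswith('```'):
--             if in_code_block:
--                 # End of code block — keep if short, skip if long
--                 if code_block_lines <= 5:
--                     filtered.extend(code_block_buffer)
--                     filtered.append(line)
--                 else:
--                     filtered.append(f"  [code block: {code_block_lines} lines omitted]")
--                 in_code_block = False
--                 code_block_lines = 0
--                 code_block_buffer = []
--             else:
--                 in_code_block = True
--                 code_block_buffer = [line]
--             continue
--
--         if in_code_block:
--             code_block_lines += 1
--             code_block_buffer.append(line)
--             continue
--
--         # Skip log-like lines (timestamps, brackets, repeated status)
--         stripped = line.strip()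
--         if not stripped:
--             filtered.append(line)
--             continue
--
--         # Skip heartbeat/status lines
--         if any(p in stripped.lower() for p in [
--             'heartbeat_ok', 'no alert needed', 'no trend analysis',
--             'pnl change since last', 'under $100 threshold',
--             'within normal range'
--         ]):
--             continue
--
--         # Skip very short lines
--         if len(stripped) < 3:
--             continue
--
--         # Dedup near-identical lines (like repeated status checks)
--         # Use first 40 chars as fingerprint
--         fingerprint = stripped[:40]
--         if fingerprint in seen_patterns:
--             continue
--         seen_patterns.add(fingerprint)
--
--         filtered.append(line)
--
--     return '\n'.join(filtered)
-- ===== SOURCE B (Python) =====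
-- def pre_filter(text: str) -> str:
--     """Region-based rewrite: scan ahead for each code block's closing fence,
--     emit blocks whole or summarized, filter plain lines with one shared dedup set."""
--     patterns = [
--         'heartbeat_ok', 'no alert needed', 'no trend analysis',
--         'pnl change since last', 'under $100 threshold',
--         'within normal range'
--     ]
--     lines = text.split('\n')
--     n = len(lines)
--     out = []
--     seen = set()
--     i = 0
--     while i < n:
--         line = lines[i]
--         stripped = line.strip()
--         if stripped.startswith('```'):
--             j = i + 1
--             while j < n and not lines[j].strip().startswith('```'):
--                 j += 1
--             if j == n:
--                 break  # unterminated trailing code block: dropped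
--             interior = lines[i + 1:j]
--             if len(interior) <= 5:
--                 out.append(line)
--                 out.extend(interior)
--                 out.append(lines[j])
--             else:
--                 out.append(f"  [code block: {len(interior)} lines omitted]")
--             i = j + 1
--             continue
--         if not stripped:
--             out.append(line)
--         elif any(p in stripped.lower() for p in patterns):
--             pass
--         elif len(stripped) < 3:
--             pass
--         else:
--             fp = stripped[:40]
--             if fp not in seen:
--                 seen.add(fp)
--                 out.append(line)
--         i += 1
--     return '\n'.join(out)
-- ===== Notes on version B (the rewrite author's own statement) =====
-- stated objective: alternative
-- what changed: Replaced A's single-pass five-field state machine (in_code flag, counter, code buffer) with an index-based scan that, on each opening fence, looks ahead to the matching closing fence and emits the whole block (or its summary) at once, dropping an unterminated trailing block by stopping; plain lines are filtered in place with one shared dedup set.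
import Mathlib
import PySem

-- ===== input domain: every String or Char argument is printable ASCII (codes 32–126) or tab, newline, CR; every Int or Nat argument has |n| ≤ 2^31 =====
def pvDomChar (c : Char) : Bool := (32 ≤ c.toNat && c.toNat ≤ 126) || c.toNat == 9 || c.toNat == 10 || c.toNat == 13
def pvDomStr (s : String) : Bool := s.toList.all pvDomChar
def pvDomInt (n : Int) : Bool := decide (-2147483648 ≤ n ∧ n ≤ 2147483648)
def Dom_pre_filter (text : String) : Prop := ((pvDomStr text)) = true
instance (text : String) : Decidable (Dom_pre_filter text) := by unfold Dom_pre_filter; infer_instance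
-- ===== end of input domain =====

-- B replaces A's five-field state machine with an index-free scan-ahead over regions: on each
-- opening fence it looks ahead (span) for the closing fence and emits the block at once
-- (objective: alternative decomposition, same cost).

-- shared literal helpers (the very same expressions appear in both Pythons)
def pvPatterns : List String :=
  ["heartbeat_ok", "no alert needed", "no trend analysis",
   "pnl change since last", "under $100 threshold", "within normal range"]

def pvIsFence (line : String) : Bool := PySem.Str.startswith (PySem.Str.strip line) "```"

def pvIsHeartbeat (stripped : String) : Bool :=
  pvPatterns.any (fun p => PySem.Str.isIn p (PySem.Str.lower stripped))

-- ===== PORT A =====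
-- state = (filtered, in_code_block, code_block_lines, code_block_buffer, seen_patterns)
def pvAstep (st : List String × Bool × Int × List String × PySem.Set String) (line : String) :
    List String × Bool × Int × List String × PySem.Set String :=
  let (filtered, inCode, cnt, buf, seen) := st
  if pvIsFence line then
    if inCode then
      if cnt ≤ 5 then (filtered ++ buf ++ [line], false, 0, [], seen)
      else (filtered ++ ["  [code block: " ++ PySem.Int.toStr cnt ++ " lines omitted]"],
            false, 0, [], seen)
    else (filtered, true, cnt, [line], seen)
  else if inCode then (filtered, inCode, cnt + 1, buf ++ [line], seen)
  else
    let stripped := PySem.Str.strip line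
    if PySem.Str.len stripped == 0 then (filtered ++ [line], inCode, cnt, buf, seen)
    else if pvIsHeartbeat stripped then st
    else if PySem.Str.len stripped < 3 then st
    else
      let fp := PySem.Str.slice stripped none (some 40)
      if PySem.Set.contains seen fp then st
      else (filtered ++ [line], inCode, cnt, buf, PySem.Set.add seen fp)

def pre_filter (text : String) : String :=
  PySem.Str.join "\n"
    (((PySem.Str.split? text "\n").getD []).foldl pvAstep
      ([], false, 0, [], PySem.Set.empty)).1

-- ===== PORT B =====
-- scan-ahead loop of Source B: on a fence, the inner `while` finding the closing fence is List.span
def pvBgo (seen : PySem.Set String) (ls : List String) : List String :=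
  match ls with
  | [] => []
  | line :: rest =>
    let stripped := PySem.Str.strip line
    if pvIsFence line then
      match h : rest.span (fun l => !pvIsFence l) with
      | (_, []) => []  -- unterminated trailing code block: dropped
      | (interior, fence :: rest') =>
        (if interior.length ≤ 5 then line :: (interior ++ [fence])
         else ["  [code block: " ++ PySem.Int.toStr interior.length ++ " lines omitted]"]) ++
        pvBgo seen rest'
    else if PySem.Str.len stripped == 0 then line :: pvBgo seen rest
    else if pvIsHeartbeat stripped then pvBgo seen rest
    else if PySem.Str.len stripped < 3 then pvBgo seen rest
    else
      let fp := PySem.Str.slice stripped none (some 40)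
      if PySem.Set.contains seen fp then pvBgo seen rest
      else line :: pvBgo (PySem.Set.add seen fp) rest
termination_by ls.length
decreasing_by
  all_goals simp only [List.length_cons]
  · simp only [List.span_eq_takeWhile_dropWhile, Prod.mk.injEq] at h
    have hlen := List.length_dropWhile_le (fun l => !pvIsFence l) rest
    rw [h.2] at hlen
    simp only [List.length_cons] at hlen
    omega
  all_goals omega

def pre_filter_alt (text : String) : String :=
  PySem.Str.join "\n" (pvBgo PySem.Set.empty ((PySem.Str.split? text "\n").getD []))

-- ===== PRECONDITION & SPEC =====
def Spec_pre_filter (text : String) (out : String) : Prop := out = pre_filter_alt text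
instance (text : String) (out : String) : Decidable (Spec_pre_filter text out) := by unfold Spec_pre_filter; infer_instance

-- ===== CLAIM (what is proved, stated in full; the proofs are below) =====
def Claim_equal_pre_filter : Prop := ∀ (text : String), Dom_pre_filter text → Spec_pre_filter text (pre_filter text)

-- ===== LEMMAS AND PROOFS =====

theorem pvA_code (ls : List String) : ∀ (filtered buf : List String) (cnt : Int)
    (seen : PySem.Set String),
    ls.foldl pvAstep (filtered, true, cnt, buf, seen) =
    match ls.dropWhile (fun l => !pvIsFence l) with
    | [] => (filtered, true, cnt + ls.length, buf ++ ls, seen)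
    | fence :: rest =>
        let tw := ls.takeWhile (fun l => !pvIsFence l)
        rest.foldl pvAstep
          ((if cnt + tw.length ≤ 5 then filtered ++ (buf ++ tw) ++ [fence]
            else filtered ++ ["  [code block: " ++ PySem.Int.toStr (cnt + tw.length) ++ " lines omitted]"]),
           false, 0, [], seen) := by
  induction ls with
  | nil => intro filtered buf cnt seen; simp
  | cons line rest ih =>
    intro filtered buf cnt seen
    by_cases hf : pvIsFence line = true
    · simp only [List.foldl_cons, List.dropWhile_cons, List.takeWhile_cons, hf,
        Bool.not_true]
      have hstep : pvAstep (filtered, true, cnt, buf, seen) line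
          = (if cnt ≤ 5 then (filtered ++ buf ++ [line], false, 0, [], seen)
             else (filtered ++ ["  [code block: " ++ PySem.Int.toStr cnt ++ " lines omitted]"],
                   false, 0, [], seen)) := by
        simp [pvAstep, hf]
      rw [hstep]
      split_ifs with h5 <;> simp_all <;> omega
    · simp only [List.foldl_cons]
      have hstep : pvAstep (filtered, true, cnt, buf, seen) line
          = (filtered, true, cnt + 1, buf ++ [line], seen) := by
        simp [pvAstep, hf]
      rw [hstep, ih]
      simp only [List.dropWhile_cons, List.takeWhile_cons, hf]
      simp only [Bool.not_false, if_true]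
      cases hdw : rest.dropWhile (fun l => !pvIsFence l) with
      | nil =>
        have h1 : cnt + 1 + (rest.length : Int) = cnt + (((line :: rest).length : Nat) : Int) := by
          simp only [List.length_cons]; push_cast; ring
        have h2 : (buf ++ [line]) ++ rest = buf ++ (line :: rest) := by simp
        rw [h1, h2]
      | cons fence rest' =>
        have h1 : cnt + 1 + ((rest.takeWhile (fun l => !pvIsFence l)).length : Int)
            = cnt + (((line :: rest.takeWhile (fun l => !pvIsFence l)).length : Nat) : Int) := by
          simp only [List.length_cons]; push_cast; ring
        have h2 : (buf ++ [line]) ++ rest.takeWhile (fun l => !pvIsFence l)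
            = buf ++ (line :: rest.takeWhile (fun l => !pvIsFence l)) := by simp
        rw [h1, h2]

set_option maxHeartbeats 1000000 in
theorem pvA_code_nil (ls : List String) (filtered buf : List String) (cnt : Int)
    (seen : PySem.Set String) (hdw : ls.dropWhile (fun l => !pvIsFence l) = []) :
    ls.foldl pvAstep (filtered, true, cnt, buf, seen)
      = (filtered, true, cnt + ls.length, buf ++ ls, seen) := by
  rw [pvA_code, hdw]

set_option maxHeartbeats 1000000 in
theorem pvA_code_cons (ls : List String) (filtered buf : List String) (cnt : Int)
    (seen : PySem.Set String) (fence : String) (rest : List String)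
    (hdw : ls.dropWhile (fun l => !pvIsFence l) = fence :: rest) :
    ls.foldl pvAstep (filtered, true, cnt, buf, seen)
      = rest.foldl pvAstep
          ((if cnt + (ls.takeWhile (fun l => !pvIsFence l)).length ≤ 5 then
              filtered ++ (buf ++ ls.takeWhile (fun l => !pvIsFence l)) ++ [fence]
            else filtered ++ ["  [code block: " ++
              PySem.Int.toStr (cnt + (ls.takeWhile (fun l => !pvIsFence l)).length) ++ " lines omitted]"]),
           false, 0, [], seen) := by
  rw [pvA_code, hdw]

set_option maxHeartbeats 1000000 in
theorem pvAB (seen : PySem.Set String) (ls : List String) : ∀ (filtered : List String),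
    (ls.foldl pvAstep (filtered, false, 0, [], seen)).1 = filtered ++ pvBgo seen ls := by
  induction seen, ls using pvBgo.induct with
  | case1 seen => intro filtered; simp [pvBgo]
  | case2 seen line rest hf fst hspan =>
    intro filtered
    rw [List.span_eq_takeWhile_dropWhile] at hspan
    have hdw : rest.dropWhile (fun l => !pvIsFence l) = [] := congrArg Prod.snd hspan
    simp only [List.foldl_cons]
    have hstep : pvAstep (filtered, false, 0, [], seen) line
        = (filtered, true, 0, [line], seen) := by
      simp [pvAstep, hf]
    rw [hstep, pvA_code_nil _ _ _ _ _ hdw, pvBgo]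
    rw [if_pos hf]
    split
    · simp
    · rename_i interior fence rest' h'
      have e := hspan.symm.trans ((List.span_eq_takeWhile_dropWhile _ rest).symm.trans h')
      exact absurd (congrArg Prod.snd e) (by simp)
  | case3 seen line rest hf interior fence rest' hspan ih =>
    intro filtered
    rw [List.span_eq_takeWhile_dropWhile] at hspan
    have htw : rest.takeWhile (fun l => !pvIsFence l) = interior := congrArg Prod.fst hspan
    have hdw : rest.dropWhile (fun l => !pvIsFence l) = fence :: rest' := congrArg Prod.snd hspan
    simp only [List.foldl_cons]
    have hstep : pvAstep (filtered, false, 0, [], seen) line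
        = (filtered, true, 0, [line], seen) := by
      simp [pvAstep, hf]
    rw [hstep, pvA_code_cons _ _ _ _ _ _ _ hdw, pvBgo]
    rw [if_pos hf]
    simp only [htw, zero_add]
    by_cases h5 : (interior.length : Int) ≤ 5
    · rw [if_pos h5, ih]
      have h5' : interior.length ≤ 5 := by exact_mod_cast h5
      split
      · rename_i fst h'
        have e := hspan.symm.trans ((List.span_eq_takeWhile_dropWhile _ rest).symm.trans h')
        exact absurd (congrArg Prod.snd e) (by simp)
      · rename_i interior1 fence1 rest1 h'
        have e := hspan.symm.trans ((List.span_eq_takeWhile_dropWhile _ rest).symm.trans h')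
        injection e with e1 e2
        injection e2 with e3 e4
        subst e1; subst e3; subst e4
        rw [if_pos h5']
        simp [List.append_assoc]
    · rw [if_neg h5, ih]
      have h5' : ¬ interior.length ≤ 5 := fun hc => h5 (by exact_mod_cast hc)
      split
      · rename_i fst h'
        have e := hspan.symm.trans ((List.span_eq_takeWhile_dropWhile _ rest).symm.trans h')
        exact absurd (congrArg Prod.snd e) (by simp)
      · rename_i interior1 fence1 rest1 h'
        have e := hspan.symm.trans ((List.span_eq_takeWhile_dropWhile _ rest).symm.trans h')
        simp only [Prod.mk.injEq, List.cons.injEq] at e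
        obtain ⟨e1, e3, e4⟩ := e
        subst e1; subst e3; subst e4
        simp [h5', List.append_assoc]
  | case4 seen line rest stripped hf hblank ih =>
    intro filtered
    have hb : (PySem.Str.len (PySem.Str.strip line) == 0) = true := hblank
    simp at hb
    have hstep : pvAstep (filtered, false, 0, [], seen) line
        = (filtered ++ [line], false, 0, [], seen) := by
      simp [pvAstep, hf, hb]
    simp only [List.foldl_cons]
    rw [hstep, ih, pvBgo]
    simp [hf, hb]
  | case5 seen line rest stripped hf hblank hhb ih =>
    intro filtered
    have hb : ¬ (PySem.Str.len (PySem.Str.strip line) == 0) = true := hblank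
    simp at hb
    have hh : pvIsHeartbeat (PySem.Str.strip line) = true := hhb
    have hstep : pvAstep (filtered, false, 0, [], seen) line
        = (filtered, false, 0, [], seen) := by
      simp [pvAstep, hf, hb, hh]
    simp only [List.foldl_cons]
    rw [hstep, ih, pvBgo]
    simp [hf, hb, hh]
  | case6 seen line rest stripped hf hblank hhb hshort ih =>
    intro filtered
    have hb : ¬ (PySem.Str.len (PySem.Str.strip line) == 0) = true := hblank
    simp at hb
    have hh : ¬ pvIsHeartbeat (PySem.Str.strip line) = true := hhb
    have hs : PySem.Str.len (PySem.Str.strip line) < 3 := hshort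
    simp at hs
    have hstep : pvAstep (filtered, false, 0, [], seen) line
        = (filtered, false, 0, [], seen) := by
      simp [pvAstep, hf, hb, hh, hs]
    simp only [List.foldl_cons]
    rw [hstep, ih, pvBgo]
    simp [hf, hb, hh, hs]
  | case7 seen line rest stripped hf hblank hhb hshort fp hfp ih =>
    intro filtered
    have hb : ¬ (PySem.Str.len (PySem.Str.strip line) == 0) = true := hblank
    simp at hb
    have hh : ¬ pvIsHeartbeat (PySem.Str.strip line) = true := hhb
    have hs : ¬ PySem.Str.len (PySem.Str.strip line) < 3 := hshort
    simp at hs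
    have hp : PySem.Set.contains seen (PySem.Str.slice (PySem.Str.strip line) none (some 40)) = true := hfp
    simp at hp
    have hs' : ¬ (PySem.Chars.strip line.toList).length < 3 := not_lt.mpr hs
    have hstep : pvAstep (filtered, false, 0, [], seen) line
        = (filtered, false, 0, [], seen) := by
      simp [pvAstep, hf, hb, hh, hs', hp]
    simp only [List.foldl_cons]
    rw [hstep, ih, pvBgo]
    simp [hf, hb, hh, hs', hp]
  | case8 seen line rest stripped hf hblank hhb hshort fp hfp ih =>
    intro filtered
    have hb : ¬ (PySem.Str.len (PySem.Str.strip line) == 0) = true := hblank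
    simp at hb
    have hh : ¬ pvIsHeartbeat (PySem.Str.strip line) = true := hhb
    have hs : ¬ PySem.Str.len (PySem.Str.strip line) < 3 := hshort
    simp at hs
    have hp : ¬ PySem.Set.contains seen (PySem.Str.slice (PySem.Str.strip line) none (some 40)) = true := hfp
    simp at hp
    have hs' : ¬ (PySem.Chars.strip line.toList).length < 3 := not_lt.mpr hs
    have hstep : pvAstep (filtered, false, 0, [], seen) line
        = (filtered ++ [line], false, 0, [],
           PySem.Set.add seen (PySem.Str.slice (PySem.Str.strip line) none (some 40))) := by
      simp [pvAstep, hf, hb, hh, hs', hp]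
    simp only [List.foldl_cons]
    rw [hstep, ih, pvBgo]
    simp [hf, hb, hh, hs', hp, PySem.Set.add]
    rw [if_neg hp]

-- ===== VERDICT (by name: the statement is the Claim_ definition above) =====
theorem pre_filter_spec : Claim_equal_pre_filter := by
  intro text _
  unfold Spec_pre_filter pre_filter pre_filter_alt
  rw [pvAB]
  simp
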